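-- pv_equiv track=rewrite | github.com/valestanov/LinguisticToolkit | linguistictoolkit/tools/yubao.py | sdtodiacritics
-- ===== SOURCE A (Python) =====
-- def sdtodiacritics(word,diacriticstable,sdfh='0123456789'):
--     word += ' '
--     newword = ''
--     sd = ''
--     for char in word:
--         if char in sdfh:
--             sd += char
--         else:
--             if sd == '':
--                 newword += char
--             else:
--                 try:
--                     newword += diacriticstable[sd]
--                     newword += '-'
--                 except KeyError:
--                     newword += sd
--                 newword += char
--                 sd = ''
--     newword = newword.replace('- ',' ')
--     newword = newword[:-1]
--     return newword
-- ===== SOURCE B (Python) =====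
-- def sdtodiacritics(word, diacriticstable, sdfh='0123456789'):
--     # Run-oriented two-pointer rewrite: consume maximal sdfh-runs at once
--     # instead of a per-character accumulator state machine.
--     s = word + ' '
--     parts = []
--     i, n = 0, len(s)
--     while i < n:
--         if s[i] in sdfh:
--             j = i + 1
--             while j < n and s[j] in sdfh:
--                 j += 1
--             if j < n:
--                 run = s[i:j]
--                 if run in diacriticstable:
--                     parts.append(diacriticstable[run] + '-')
--                 else:
--                     parts.append(run)
--                 parts.append(s[j])
--             # a run reaching the end of s is discarded
--             i = j + 1
--         else:
--             parts.append(s[i])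
--             i += 1
--     return ''.join(parts).replace('- ', ' ')[:-1]
-- ===== Notes on version B (the rewrite author's own statement) =====
-- stated objective: alternative
-- what changed: Replaced A's per-character accumulator state machine (building newword and a pending digit-buffer sd char by char) with a run-oriented two-pointer scan that consumes each maximal sdfh-run at once, emits its translated segment into a parts list and joins at the end.
import Mathlib
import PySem

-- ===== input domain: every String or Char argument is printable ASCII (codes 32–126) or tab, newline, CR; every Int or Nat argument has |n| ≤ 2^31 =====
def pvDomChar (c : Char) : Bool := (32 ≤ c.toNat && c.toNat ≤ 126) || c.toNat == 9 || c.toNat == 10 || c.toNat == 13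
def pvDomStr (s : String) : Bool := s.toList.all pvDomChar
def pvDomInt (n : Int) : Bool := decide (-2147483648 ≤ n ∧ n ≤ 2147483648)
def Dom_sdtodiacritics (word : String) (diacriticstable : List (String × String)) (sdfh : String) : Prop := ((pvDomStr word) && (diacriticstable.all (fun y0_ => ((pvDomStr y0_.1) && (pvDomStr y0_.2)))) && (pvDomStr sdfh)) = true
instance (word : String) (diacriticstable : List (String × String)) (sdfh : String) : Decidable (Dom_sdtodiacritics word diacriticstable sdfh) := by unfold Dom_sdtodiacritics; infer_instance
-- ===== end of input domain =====

-- B replaces A's per-character accumulator state machine by a run-oriented two-pointer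
-- scan that consumes each maximal sdfh-run at once (objective: alternative; same cost).

-- ===== PORT A =====
-- the for-loop of A, as structural recursion over the characters with the same
-- state (newword, sd); `char in sdfh` for a 1-char string is exactly membership
def sdAAux (dt : PySem.Dict String String) (sdfh : List Char) :
    List Char → List Char → List Char → List Char
  | [], newword, _sd => newword
  | c :: rest, newword, sd =>
    if sdfh.contains c then
      sdAAux dt sdfh rest newword (sd ++ [c])
    else if sd = [] then
      sdAAux dt sdfh rest (newword ++ [c]) []
    else
      match dt.get? (String.ofList sd) with       -- try: ... except KeyError
      | some v => sdAAux dt sdfh rest (newword ++ v.toList ++ ['-'] ++ [c]) []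
      | none   => sdAAux dt sdfh rest (newword ++ sd ++ [c]) []

def sdtodiacritics (word : String) (diacriticstable : List (String × String)) (sdfh : String) : String :=
  let nw := sdAAux (PySem.Dict.ofList diacriticstable) sdfh.toList
              (word.toList ++ [' ']) [] []                         -- word += ' '; loop
  let nw := PySem.Chars.replace nw ['-', ' '] [' ']                -- .replace('- ',' ')
  String.ofList nw.dropLast                                            -- [:-1]

-- ===== PORT B =====
-- the outer while-loop of Source B: each step emits the segments produced for one
-- maximal sdfh-run (plus its terminator) or for one literal character
def sdBAux (dt : PySem.Dict String String) (sdfh : List Char) :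
    List Char → List (List Char)
  | [] => []
  | c :: rest =>
    if sdfh.contains c then
      let run := c :: rest.takeWhile (fun x => sdfh.contains x)    -- inner while: j
      match h : rest.dropWhile (fun x => sdfh.contains x) with
      | [] => []                                                   -- trailing run dropped
      | c' :: rest' =>
        (match dt.get? (String.ofList run) with                        -- run in diacriticstable
         | some v => v.toList ++ ['-']
         | none   => run) :: [c'] :: sdBAux dt sdfh rest'
    else
      [c] :: sdBAux dt sdfh rest
termination_by cs => cs.length
decreasing_by
  · have h1 : (rest.dropWhile (fun x => sdfh.contains x)).length ≤ rest.length :=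
      List.length_dropWhile_le _ _
    rw [h] at h1
    simp at h1 ⊢
    omega
  · simp

def sdtodiacritics_alt (word : String) (diacriticstable : List (String × String)) (sdfh : String) : String :=
  let parts := sdBAux (PySem.Dict.ofList diacriticstable) sdfh.toList (word.toList ++ [' '])
  let nw := parts.flatten                                          -- ''.join(parts)
  String.ofList ((PySem.Chars.replace nw ['-', ' '] [' ']).dropLast)   -- .replace('- ',' ')[:-1]

-- ===== PRECONDITION & SPEC =====
def Spec_sdtodiacritics (word : String) (diacriticstable : List (String × String)) (sdfh : String) (out : String) : Prop := out = sdtodiacritics_alt word diacriticstable sdfh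
instance (word : String) (diacriticstable : List (String × String)) (sdfh : String) (out : String) : Decidable (Spec_sdtodiacritics word diacriticstable sdfh out) := by unfold Spec_sdtodiacritics; infer_instance

-- ===== CLAIM (what is proved, stated in full; the proofs are below) =====
def Claim_equal_sdtodiacritics : Prop := ∀ (word : String) (diacriticstable : List (String × String)) (sdfh : String), Dom_sdtodiacritics word diacriticstable sdfh → Spec_sdtodiacritics word diacriticstable sdfh (sdtodiacritics word diacriticstable sdfh)

-- ===== LEMMAS AND PROOFS =====

lemma takeWhile_append_all {α : Type} (p : α → Bool) (l1 l2 : List α)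
    (h : ∀ x ∈ l1, p x) : (l1 ++ l2).takeWhile p = l1 ++ l2.takeWhile p := by
  induction l1 with
  | nil => simp
  | cons a t ih =>
    simp only [List.cons_append, List.takeWhile_cons, h a (by simp)]
    simp [ih (fun x hx => h x (by simp [hx]))]

lemma dropWhile_append_all {α : Type} (p : α → Bool) (l1 l2 : List α)
    (h : ∀ x ∈ l1, p x) : (l1 ++ l2).dropWhile p = l2.dropWhile p := by
  induction l1 with
  | nil => simp
  | cons a t ih =>
    simp only [List.cons_append, List.dropWhile_cons, h a (by simp)]
    simp [ih (fun x hx => h x (by simp [hx]))]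

-- unfolding equations for the well-founded sdBAux
lemma sdBAux_nil (dt : PySem.Dict String String) (sdfh : List Char) :
    sdBAux dt sdfh [] = [] := by
  rw [sdBAux.eq_def]

lemma sdBAux_not (dt : PySem.Dict String String) (sdfh : List Char) (c : Char)
    (rest : List Char) (hc : sdfh.contains c = false) :
    sdBAux dt sdfh (c :: rest) = [c] :: sdBAux dt sdfh rest := by
  rw [sdBAux.eq_def]
  simp only [hc]
  rfl

lemma sdBAux_run_end (dt : PySem.Dict String String) (sdfh : List Char) (c : Char)
    (rest : List Char) (hc : sdfh.contains c = true)
    (hdrop : rest.dropWhile (fun x => sdfh.contains x) = []) :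
    sdBAux dt sdfh (c :: rest) = [] := by
  rw [sdBAux.eq_def]
  simp only [hc, if_true]
  split
  · rfl
  · rename_i h
    rw [hdrop] at h
    exact absurd h (by simp)

lemma sdBAux_run (dt : PySem.Dict String String) (sdfh : List Char) (c : Char)
    (rest : List Char) (hc : sdfh.contains c = true) (c' : Char) (rest' : List Char)
    (hdrop : rest.dropWhile (fun x => sdfh.contains x) = c' :: rest') :
    sdBAux dt sdfh (c :: rest) =
      (match dt.get? (String.ofList (c :: rest.takeWhile (fun x => sdfh.contains x))) with
       | some v => v.toList ++ ['-']
       | none   => c :: rest.takeWhile (fun x => sdfh.contains x)) ::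
        [c'] :: sdBAux dt sdfh rest' := by
  rw [sdBAux.eq_def]
  simp only [hc, if_true]
  split
  · rename_i h
    rw [hdrop] at h
    exact absurd h (by simp)
  · rename_i c1 r1 h
    rw [hdrop] at h
    injection h with h1 h2
    subst h1; subst h2
    rfl

-- the loop invariant: A's state machine with pending run sd and accumulator acc
-- equals acc ++ B's run-scan applied to sd ++ (remaining input)
lemma sdAux_eq (dt : PySem.Dict String String) (sdfh : List Char) :
    ∀ (cs sd acc : List Char), (∀ ch ∈ sd, sdfh.contains ch = true) →
      sdAAux dt sdfh cs acc sd = acc ++ (sdBAux dt sdfh (sd ++ cs)).flatten := by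
  intro cs
  induction cs with
  | nil =>
    intro sd acc hsd
    match sd with
    | [] => simp [sdAAux, sdBAux_nil]
    | d :: s' =>
      have hd : sdfh.contains d = true := hsd d (by simp)
      have hdrop : (s' ++ ([] : List Char)).dropWhile (fun x => sdfh.contains x) = [] := by
        rw [List.dropWhile_eq_nil_iff]
        intro x hx
        exact hsd x (by simp at hx; simp [hx])
      rw [sdAAux, List.cons_append, sdBAux_run_end dt sdfh d _ hd hdrop]
      simp
  | cons c rest ih =>
    intro sd acc hsd
    cases hc : sdfh.contains c with
    | true =>
      rw [sdAAux]
      simp only [hc, if_true]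
      rw [ih (sd ++ [c]) acc (by intro x hx; simp at hx
                                 rcases hx with hx | hx
                                 · exact hsd x hx
                                 · subst hx; exact hc)]
      simp
    | false =>
      match sd with
      | [] =>
        rw [sdAAux]
        simp only [hc, Bool.false_eq_true, if_false, if_true]
        rw [ih [] (acc ++ [c]) (by simp), List.nil_append, List.nil_append,
            sdBAux_not dt sdfh c rest hc]
        simp
      | d :: s' =>
        have hd : sdfh.contains d = true := hsd d (by simp)
        have hall : ∀ x ∈ s', sdfh.contains x = true := fun x hx => hsd x (by simp [hx])
        have htake : (s' ++ c :: rest).takeWhile (fun x => sdfh.contains x) = s' := by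
          rw [takeWhile_append_all _ _ _ hall, List.takeWhile_cons, hc]
          simp
        have hdrop : (s' ++ c :: rest).dropWhile (fun x => sdfh.contains x) = c :: rest := by
          rw [dropWhile_append_all _ _ _ hall, List.dropWhile_cons, hc]
          simp
        rw [sdAAux]
        simp only [hc, Bool.false_eq_true, if_false, reduceCtorEq, reduceIte]
        rw [List.cons_append, sdBAux_run dt sdfh d _ hd c rest hdrop, htake]
        match hg : dt.get? (String.ofList (d :: s')) with
        | some v =>
          simp only
          rw [ih [] (acc ++ v.toList ++ ['-'] ++ [c]) (by simp), List.nil_append]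
          simp
        | none =>
          simp only
          rw [ih [] (acc ++ (d :: s') ++ [c]) (by simp), List.nil_append]
          simp

-- ===== VERDICT (by name: the statement is the Claim_ definition above) =====
theorem sdtodiacritics_spec : Claim_equal_sdtodiacritics := by
  intro word dt sdfh _
  unfold Spec_sdtodiacritics sdtodiacritics sdtodiacritics_alt
  rw [sdAux_eq _ _ _ [] [] (by simp)]
  simp
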